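-- pv_equiv track=rewrite | github.com/CEA-LIST/N2D2 | python/n2d2/utils.py | _get_param_docstring
-- ===== SOURCE A (Python) =====
-- def _get_param_docstring(docstring):
--     header = True
--     param_docstring = ""
--     for line in docstring.split("\n"):
--         if header and ":param" in line:
--             header=False
--         if not header:
--             param_docstring+=line + "\n"
--     return param_docstring
-- ===== SOURCE B (Python) =====
-- def _get_param_docstring(docstring):
--     lines = docstring.split("\n")
--     idx = next((i for i, line in enumerate(lines) if ":param" in line), None)
--     if idx is None:
--         return ""
--     return "\n".join(lines[idx:]) + "\n"
-- ===== Notes on version B (the rewrite author's own statement) =====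
-- stated objective: simpler
-- what changed: Replaced the flag-threaded accumulation loop by a locate-then-slice decomposition: find the index of the first line containing ':param', then return '\n'.join(lines[idx:]) + '\n' (or '' if absent).
import Mathlib
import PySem

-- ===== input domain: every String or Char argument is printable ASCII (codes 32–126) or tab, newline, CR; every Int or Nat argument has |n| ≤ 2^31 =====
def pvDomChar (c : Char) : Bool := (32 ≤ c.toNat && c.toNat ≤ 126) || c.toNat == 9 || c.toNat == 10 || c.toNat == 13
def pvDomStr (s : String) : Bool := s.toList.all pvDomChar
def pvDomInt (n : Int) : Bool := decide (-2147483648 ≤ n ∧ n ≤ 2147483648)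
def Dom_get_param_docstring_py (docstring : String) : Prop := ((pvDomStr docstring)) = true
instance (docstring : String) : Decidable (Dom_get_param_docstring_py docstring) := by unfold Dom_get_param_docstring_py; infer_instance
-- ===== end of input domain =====

-- B replaces A's flag-threaded single pass by locate-the-first-':param'-line then slice-and-join: simpler decomposition, same O(n) cost.

-- ===== PORT A =====
def get_param_docstring_py (docstring : String) : String :=
  let lines := PySem.Chars.splitOn docstring.toList "\n".toList
  let st := lines.foldl (fun (st : Bool × List Char) line =>
      let header := st.1 && !(PySem.Chars.isIn ":param".toList line)
      (header, if header then st.2 else st.2 ++ line ++ ['\n'])) (true, ([] : List Char))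
  String.mk st.2

-- ===== PORT B =====
def get_param_docstring_py_alt (docstring : String) : String :=
  let lines := PySem.Chars.splitOn docstring.toList "\n".toList
  match lines.findIdx? (fun line => PySem.Chars.isIn ":param".toList line) with
  | none => ""
  | some i => String.mk (PySem.Chars.join "\n".toList (lines.drop i) ++ ['\n'])

-- ===== PRECONDITION & SPEC =====
def Spec_get_param_docstring_py (docstring : String) (out : String) : Prop := out = get_param_docstring_py_alt docstring
instance (docstring : String) (out : String) : Decidable (Spec_get_param_docstring_py docstring out) := by unfold Spec_get_param_docstring_py; infer_instance

-- ===== CLAIM (what is proved, stated in full; the proofs are below) =====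
def Claim_equal_get_param_docstring_py : Prop := ∀ (docstring : String), Dom_get_param_docstring_py docstring → Spec_get_param_docstring_py docstring (get_param_docstring_py docstring)

-- ===== LEMMAS AND PROOFS =====

-- A's fold once the header flag is cleared: it appends every remaining line plus '\n'.
theorem pv_foldl_false (p : List Char → Bool) (ls : List (List Char)) (acc : List Char) :
    ls.foldl (fun (st : Bool × List Char) line =>
      let header := st.1 && !(p line)
      (header, if header then st.2 else st.2 ++ line ++ ['\n'])) (false, acc)
    = (false, acc ++ (ls.map (fun l => l ++ ['\n'])).flatten) := by
  induction ls generalizing acc with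
  | nil => simp
  | cons l ls ih =>
    rw [List.foldl_cons]
    show List.foldl _ ((false : Bool), acc ++ l ++ ['\n']) ls = _
    rw [ih]
    simp [List.append_assoc]

-- A's fold from the initial (header = true) state, characterised by the first matching line.
theorem pv_foldl_true (p : List Char → Bool) (ls : List (List Char)) (acc : List Char) :
    ls.foldl (fun (st : Bool × List Char) line =>
      let header := st.1 && !(p line)
      (header, if header then st.2 else st.2 ++ line ++ ['\n'])) (true, acc)
    = (match ls.findIdx? p with
       | none => (true, acc)
       | some i => (false, acc ++ ((ls.drop i).map (fun l => l ++ ['\n'])).flatten)) := by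
  induction ls generalizing acc with
  | nil => simp
  | cons l ls ih =>
    by_cases hp : p l
    · rw [List.foldl_cons]
      simp only [hp]
      show List.foldl _ ((false : Bool), acc ++ l ++ ['\n']) ls = _
      rw [pv_foldl_false]
      simp [List.findIdx?_cons, hp, List.append_assoc]
    · have hp' : p l = false := by simpa using hp
      rw [List.foldl_cons]
      simp only [hp']
      show List.foldl _ ((true : Bool), acc) ls = _
      rw [ih]
      cases h : ls.findIdx? p with
      | none => simp [List.findIdx?_cons, hp', h]
      | some i => simp [List.findIdx?_cons, hp', h, List.drop_succ_cons]

-- '\n'.join(xs) + '\n' equals concatenating every line with a trailing '\n', for nonempty xs.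
theorem pv_join_flatten (l : List Char) (ls : List (List Char)) :
    PySem.Chars.join ['\n'] (l :: ls) ++ ['\n']
    = ((l :: ls).map (fun x => x ++ ['\n'])).flatten := by
  induction ls generalizing l with
  | nil => simp [PySem.Chars.join, List.intercalate]
  | cons m ls ih =>
    rw [PySem.Chars.join_cons_cons]
    simp only [List.append_assoc]
    rw [ih m]
    simp [List.append_assoc]

-- ===== VERDICT (by name: the statement is the Claim_ definition above) =====
theorem get_param_docstring_py_spec : Claim_equal_get_param_docstring_py := by
  intro docstring _
  unfold Spec_get_param_docstring_py get_param_docstring_py get_param_docstring_py_alt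
  simp only [show "\n".toList = ['\n'] from rfl]
  rw [pv_foldl_true]
  cases h : (PySem.Chars.splitOn docstring.toList ['\n']).findIdx?
      (fun line => PySem.Chars.isIn ":param".toList line) with
  | none => rfl
  | some i =>
    simp only
    have hi : i < (PySem.Chars.splitOn docstring.toList ['\n']).length :=
      List.findIdx?_eq_some_iff_findIdx_eq.mp h |>.1
    have hne : (PySem.Chars.splitOn docstring.toList ['\n']).drop i ≠ [] := by
      simp [List.drop_eq_nil_iff]; omega
    cases hd : (PySem.Chars.splitOn docstring.toList ['\n']).drop i with
    | nil => exact absurd hd hne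
    | cons l ls =>
      rw [pv_join_flatten]
      simp
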